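-- pv_equiv track=rewrite | github.com/materialsvirtuallab/maml | maml/apps/pes/lammps/calcs.py | get_bs_subscripts
-- ===== SOURCE A (Python) =====
-- import itertools
--
-- def get_bs_subscripts(twojmax):
--     """
--     Method to list the subscripts 2j1, 2j2, 2j of bispectrum
--     components.
--
--     Args:
--         twojmax (int): Band limit for bispectrum components.
--
--     Returns:
--         List of all subscripts [2j1, 2j2, 2j].
--
--     """
--     subs = itertools.product(range(twojmax + 1), repeat=3)
--     filters = [lambda x: True if x[0] >= x[1] else False,
--                lambda x: True if x[2] >= x[0] else False]
--     j_filter = lambda x: True if x[2] in range(x[0] - x[1],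
--                         min(twojmax, x[0] + x[1]) + 1, 2) else False
--     filters.append(j_filter)
--     for f in filters:
--         subs = filter(f, subs)
--     return list(subs)
-- ===== SOURCE B (Python) =====
-- def get_bs_subscripts(twojmax):
--     """
--     Method to list the subscripts 2j1, 2j2, 2j of bispectrum
--     components.
--
--     Args:
--         twojmax (int): Band limit for bispectrum components.
--
--     Returns:
--         List of all subscripts [2j1, 2j2, 2j].
--
--     """
--     res = []
--     for j1 in range(twojmax + 1):
--         for j2 in range(j1 + 1):
--             for j in range(j1 - j2, min(twojmax, j1 + j2) + 1, 2):
--                 if j >= j1: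
--                     res.append((j1, j2, j))
--     return res
-- ===== Notes on version B (the rewrite author's own statement) =====
-- stated objective: faster
-- what changed: Replaces the full cubic itertools.product plus three chained filters with three nested loops whose range bounds encode the constraints directly; intended as faster (a timing run measured large speedups wherever both finished but could not confirm the label at its largest size).
import Mathlib
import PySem

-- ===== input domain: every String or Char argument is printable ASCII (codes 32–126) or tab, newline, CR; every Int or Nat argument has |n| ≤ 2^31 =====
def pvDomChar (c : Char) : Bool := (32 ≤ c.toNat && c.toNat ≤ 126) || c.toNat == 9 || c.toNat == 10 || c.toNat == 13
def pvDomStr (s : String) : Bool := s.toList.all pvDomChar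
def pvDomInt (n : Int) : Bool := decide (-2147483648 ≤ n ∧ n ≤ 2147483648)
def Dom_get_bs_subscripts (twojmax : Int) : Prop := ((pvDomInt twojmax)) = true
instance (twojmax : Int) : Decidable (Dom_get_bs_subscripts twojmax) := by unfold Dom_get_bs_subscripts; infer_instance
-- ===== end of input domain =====

-- B replaces the cubic product-then-filter pipeline by three nested loops whose range
-- bounds encode the constraints directly (intended as faster; a timing run measured
-- large speedups wherever both finished but could not confirm the label at its largest size).

-- ===== PORT A =====
-- itertools.product(range(twojmax+1), repeat=3), then the three filters applied in order.
def get_bs_subscripts (twojmax : Int) : List (Int × Int × Int) :=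
  let r := PySem.List.pyRange 0 (twojmax + 1) 1
  let subs := r.flatMap (fun a => r.flatMap (fun b => r.map (fun c => (a, b, c))))
  let subs1 := subs.filter (fun x => decide (x.2.1 ≤ x.1))
  let subs2 := subs1.filter (fun x => decide (x.1 ≤ x.2.2))
  subs2.filter (fun x =>
    decide (x.2.2 ∈ PySem.List.pyRange (x.1 - x.2.1) (min twojmax (x.1 + x.2.1) + 1) 2))

-- ===== PORT B =====
-- three nested loops with direct bounds, appending (j1, j2, j) when j >= j1.
def get_bs_subscripts_alt (twojmax : Int) : List (Int × Int × Int) :=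
  (PySem.List.pyRange 0 (twojmax + 1) 1).foldl (fun acc j1 =>
    (PySem.List.pyRange 0 (j1 + 1) 1).foldl (fun acc j2 =>
      (PySem.List.pyRange (j1 - j2) (min twojmax (j1 + j2) + 1) 2).foldl (fun acc j =>
        if j1 ≤ j then acc ++ [(j1, j2, j)] else acc) acc) acc) []

-- ===== PRECONDITION & SPEC =====
def Spec_get_bs_subscripts (twojmax : Int) (out : List (Int × Int × Int)) : Prop := out = get_bs_subscripts_alt twojmax
instance (twojmax : Int) (out : List (Int × Int × Int)) : Decidable (Spec_get_bs_subscripts twojmax out) := by unfold Spec_get_bs_subscripts; infer_instance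

-- ===== CLAIM (what is proved, stated in full; the proofs are below) =====
def Claim_equal_get_bs_subscripts : Prop := ∀ (twojmax : Int), Dom_get_bs_subscripts twojmax → Spec_get_bs_subscripts twojmax (get_bs_subscripts twojmax)

-- ===== LEMMAS AND PROOFS =====

-- two strictly increasing integer lists with the same members are equal
theorem pv_eq_of_pairwise_lt : ∀ {l s : List Int}, l.Pairwise (· < ·) →
    s.Pairwise (· < ·) → (∀ x, x ∈ l ↔ x ∈ s) → l = s
  | [], [], _, _, _ => rfl
  | [], b :: s, _, _, h => absurd ((h b).2 (List.mem_cons_self)) (List.not_mem_nil)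
  | a :: l, [], _, _, h => absurd ((h a).1 (List.mem_cons_self)) (List.not_mem_nil)
  | a :: l, b :: s, hl, hs, h => by
    have hab : a = b := by
      rcases List.mem_cons.1 ((h a).1 List.mem_cons_self) with h1 | h1
      · exact h1
      · rcases List.mem_cons.1 ((h b).2 List.mem_cons_self) with h2 | h2
        · exact h2.symm
        · exact absurd (lt_trans ((List.pairwise_cons.1 hs).1 a h1)
            ((List.pairwise_cons.1 hl).1 b h2)) (lt_irrefl b)
    subst hab
    have htail : ∀ x, x ∈ l ↔ x ∈ s := by
      intro x
      constructor
      · intro hx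
        rcases List.mem_cons.1 ((h x).1 (List.mem_cons_of_mem _ hx)) with h1 | h1
        · exact absurd ((List.pairwise_cons.1 hl).1 x hx) (by simp [h1])
        · exact h1
      · intro hx
        rcases List.mem_cons.1 ((h x).2 (List.mem_cons_of_mem _ hx)) with h1 | h1
        · exact absurd ((List.pairwise_cons.1 hs).1 x hx) (by simp [h1])
        · exact h1
    exact congrArg (a :: ·) (pv_eq_of_pairwise_lt (List.pairwise_cons.1 hl).2
      (List.pairwise_cons.1 hs).2 htail)

theorem pv_flatMap_congr {α β : Type} {l : List α} {f g : α → List β}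
    (h : ∀ a ∈ l, f a = g a) : l.flatMap f = l.flatMap g := by
  induction l with
  | nil => rfl
  | cons x xs ih =>
    simp only [List.flatMap_cons, h x List.mem_cons_self,
      ih (fun a ha => h a (List.mem_cons_of_mem _ ha))]

-- flatMap with an 'if p x then g x else []' body is a flatMap over the filtered list
theorem pv_flatMap_ite {α β : Type} (l : List α) (p : α → Prop) [DecidablePred p]
    (g : α → List β) :
    l.flatMap (fun x => if p x then g x else []) =
      (l.filter (fun x => decide (p x))).flatMap g := by
  induction l with
  | nil => rfl
  | cons x xs ih =>
    by_cases h : p x <;> simp [List.flatMap_cons, h, ih]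

-- a step-2 Python range is strictly increasing
theorem pv_pairwise_pyRange_two (a b : Int) :
    (PySem.List.pyRange a b 2).Pairwise (· < ·) := by
  rw [PySem.List.pyRange_of_pos a b (by norm_num)]
  exact (List.pairwise_lt_range).map _ (by intro i j hij; omega)

theorem pv_main (t : Int) : get_bs_subscripts t = get_bs_subscripts_alt t := by
  simp only [get_bs_subscripts, get_bs_subscripts_alt]
  simp only [PySem.List.foldl_append_ite, PySem.List.foldl_append_eq_flatMap, List.nil_append,
    List.filter_filter, List.filter_flatMap, List.filter_map]
  apply pv_flatMap_congr
  intro a ha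
  have ha' : 0 ≤ a ∧ a < t + 1 := PySem.List.mem_pyRange_one.1 ha
  -- collapse the constant 'b ≤ a' factor of the innermost filter into an if
  have step1 : ∀ b : Int,
      (List.map (fun c => (a, b, c))
        (List.filter
          (fun c =>
            ((fun x : Int × Int × Int =>
              decide (x.2.2 ∈ PySem.List.pyRange (x.1 - x.2.1) (min t (x.1 + x.2.1) + 1) 2)) ∘ fun c =>
                  (a, b, c)) c &&
              (((fun x : Int × Int × Int => decide (x.1 ≤ x.2.2)) ∘ fun c => (a, b, c)) c &&
                ((fun x : Int × Int × Int => decide (x.2.1 ≤ x.1)) ∘ fun c => (a, b, c)) c))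
          (PySem.List.pyRange 0 (t + 1))))
      = if b ≤ a then
          List.map (fun c => (a, b, c))
            (List.filter (fun c => decide (a ≤ c))
              (PySem.List.pyRange (a - b) (min t (a + b) + 1) 2))
        else [] := by
    intro b
    by_cases hba : b ≤ a
    · rw [if_pos hba]
      congr 1
      apply pv_eq_of_pairwise_lt
      · exact (PySem.List.pairwise_lt_pyRange_one 0 (t + 1)).filter _
      · exact (pv_pairwise_pyRange_two _ _).filter _
      · intro x
        simp only [List.mem_filter, PySem.List.mem_pyRange_one,
          PySem.List.mem_pyRange_iff_of_pos (by norm_num : (0:Int) < 2),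
          Function.comp, decide_eq_true_eq, Bool.and_eq_true]
        constructor
        · rintro ⟨⟨h0, h1⟩, hm, hc, _⟩; exact ⟨hm, hc⟩
        · rintro ⟨⟨hm1, hm2, hm3⟩, hc⟩
          exact ⟨⟨by omega, by omega⟩, ⟨hm1, hm2, hm3⟩, hc, hba⟩
    · rw [if_neg hba]
      simp only [List.map_eq_nil_iff, List.filter_eq_nil_iff]
      intro c _
      simp [Function.comp, hba]
  rw [pv_flatMap_congr (fun b _ => step1 b), pv_flatMap_ite]
  have hfb : List.filter (fun b => decide (b ≤ a)) (PySem.List.pyRange 0 (t + 1))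
      = PySem.List.pyRange 0 (a + 1) 1 := by
    apply pv_eq_of_pairwise_lt
    · exact (PySem.List.pairwise_lt_pyRange_one 0 (t + 1)).filter _
    · exact PySem.List.pairwise_lt_pyRange_one 0 (a + 1)
    · intro x
      simp only [List.mem_filter, PySem.List.mem_pyRange_one, decide_eq_true_eq]
      omega
  rw [hfb]

-- ===== VERDICT (by name: the statement is the Claim_ definition above) =====
theorem get_bs_subscripts_spec : Claim_equal_get_bs_subscripts := by
  intro t _
  unfold Spec_get_bs_subscripts
  exact pv_main t
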